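-- pv_equiv track=rewrite | github.com/KushRawat/CN-DSA-Python | Practice_1/checkIndexNumber.py | checkIndex
-- ===== SOURCE A (Python) =====
-- def checkIndex(arr, x):
--     #base
--     l = len(arr)
--     if l == 0:
--         return -1
--     if arr[0] == x:
--         return 0
--
--     smallerList = arr[1:]
--     indexPosition = checkIndex(smallerList, x)
--     if indexPosition == -1:
--         return -1
--     else:
--         return indexPosition + 1
-- ===== SOURCE B (Python) =====
-- def checkIndex(arr, x):
--     for i, v in enumerate(arr):
--         if v == x:
--             return i
--     return -1
-- ===== Notes on version B (the rewrite author's own statement) =====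
-- stated objective: simpler
-- what changed: Replaced the recursion over arr[1:] (which builds a sliced copy at every level and shifts the returned index by +1) with a single flat enumerate loop returning the first matching index directly.
import Mathlib
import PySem

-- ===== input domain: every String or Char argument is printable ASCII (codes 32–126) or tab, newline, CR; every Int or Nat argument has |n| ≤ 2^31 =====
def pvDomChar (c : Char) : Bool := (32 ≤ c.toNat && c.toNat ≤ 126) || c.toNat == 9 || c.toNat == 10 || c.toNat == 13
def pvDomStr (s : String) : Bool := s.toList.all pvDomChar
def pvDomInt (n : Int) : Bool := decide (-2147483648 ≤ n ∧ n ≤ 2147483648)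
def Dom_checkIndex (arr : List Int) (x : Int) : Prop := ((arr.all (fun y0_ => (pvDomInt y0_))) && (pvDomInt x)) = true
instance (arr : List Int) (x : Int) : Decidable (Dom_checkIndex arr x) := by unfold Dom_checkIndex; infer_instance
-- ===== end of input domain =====

-- B replaces A's recursion over arr[1:] with a single flat enumerate scan (simpler, no sliced copies).

-- ===== PORT A =====
-- literal transliteration: base case on length, check head, recurse on arr[1:] and shift the index
def checkIndex (arr : List Int) (x : Int) : Int :=
  match arr with
  | [] => -1
  | a :: rest =>
    if a = x then 0
    else
      let indexPosition := checkIndex rest x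
      if indexPosition = -1 then -1 else indexPosition + 1

-- ===== PORT B =====
-- enumerate loop: first i with arr[i] == x, else -1
def checkIndexAltGo (pairs : List (Int × Int)) (x : Int) : Int :=
  match pairs with
  | [] => -1
  | (i, v) :: rest => if v = x then i else checkIndexAltGo rest x

def checkIndex_alt (arr : List Int) (x : Int) : Int :=
  checkIndexAltGo (PySem.List.enumerate arr) x

-- ===== PRECONDITION & SPEC =====
def Spec_checkIndex (arr : List Int) (x : Int) (out : Int) : Prop := out = checkIndex_alt arr x
instance (arr : List Int) (x : Int) (out : Int) : Decidable (Spec_checkIndex arr x out) := by unfold Spec_checkIndex; infer_instance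

-- ===== CLAIM (what is proved, stated in full; the proofs are below) =====
def Claim_equal_checkIndex : Prop := ∀ (arr : List Int) (x : Int), Dom_checkIndex arr x → Spec_checkIndex arr x (checkIndex arr x)

-- ===== LEMMAS AND PROOFS =====
lemma pv_checkIndex_lb (arr : List Int) (x : Int) :
    checkIndex arr x = -1 ∨ 0 ≤ checkIndex arr x := by
  induction arr with
  | nil => simp [checkIndex]
  | cons a rest ih =>
    simp only [checkIndex]
    by_cases h : a = x
    · simp [h]
    · simp only [h, if_false]
      rcases ih with h2 | h2
      · simp [h2]
      · have h3 : ¬ checkIndex rest x = -1 := by omega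
        simp only [h3, if_false]
        omega

lemma pv_go_enum (arr : List Int) (x s : Int) :
    checkIndexAltGo (PySem.List.enumerate arr s) x =
      (if checkIndex arr x = -1 then -1 else s + checkIndex arr x) := by
  induction arr generalizing s with
  | nil => simp [PySem.List.enumerate_nil, checkIndexAltGo, checkIndex]
  | cons a rest ih =>
    simp only [PySem.List.enumerate_cons, checkIndexAltGo, checkIndex]
    by_cases h : a = x
    · simp [h]
    · simp only [h, if_false, ih (s + 1)]
      rcases pv_checkIndex_lb rest x with h2 | h2
      · simp [h2]
      · have h3 : ¬ checkIndex rest x = -1 := by omega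
        have h4 : ¬ checkIndex rest x + 1 = -1 := by omega
        simp only [h3, if_false, h4]
        omega

theorem checkIndex_spec : Claim_equal_checkIndex := by
  intro arr x _
  unfold Spec_checkIndex checkIndex_alt
  rw [pv_go_enum arr x 0]
  by_cases h : checkIndex arr x = -1 <;> simp [h]
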